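-- pv_equiv track=rewrite | github.com/joaozato/Exerc-cios-python-FURG | pythonaula.py | sigla
-- ===== SOURCE A (Python) =====
-- def compacta(n): # Usando 'n' como o parâmetro de entrada
--     lista = "" # Usando 'lista' para guardar o resultado final
--     i = 0      # 'i' será nosso contador de posição (índice)
--     while i < len(n):
--         caractere_atual = n[i]
--         contagem = 1
--
--         j = i + 1
--         while j < len(n) and n[j] == caractere_atual:
--             contagem += 1
--             j += 1
--
--         lista += caractere_atual
--
--         if contagem > 1:
--             lista += str(contagem)
--
--         # Esta é a parte crucial: atualizamos o 'i' para pular o que já foi contado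
--         i = j
--
--     return lista
--
-- def sigla (n):
--     lista=''
--     nao_pode=['da','do', 'de', 'Para', 'para', 'DE', 'DO', 'DA']
--     divisor= n.split(' ')
--     for i in divisor:
--         if i not in nao_pode:
--             lista+=i[0]
--     return compacta (lista)
-- ===== SOURCE B (Python) =====
-- def sigla(n):
--     nao_pode = {'da', 'do', 'de', 'Para', 'para', 'DE', 'DO', 'DA'}
--     letras = ''.join(w[0] for w in n.split(' ') if w not in nao_pode)
--     partes = []
--     prev = None
--     cnt = 0
--     for c in letras:
--         if c == prev:
--             cnt += 1
--         else:
--             if prev is not None: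
--                 partes.append(prev + (str(cnt) if cnt > 1 else ''))
--             prev, cnt = c, 1
--     if prev is not None:
--         partes.append(prev + (str(cnt) if cnt > 1 else ''))
--     return ''.join(partes)
-- ===== Notes on version B (the rewrite author's own statement) =====
-- stated objective: simpler
-- what changed: The acronym is built by a join over a generator instead of a string-accumulating loop, and the run-length encoder becomes a single forward pass carrying (previous char, run count) that flushes on change, replacing the nested index-skip while-loops.
import Mathlib
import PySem

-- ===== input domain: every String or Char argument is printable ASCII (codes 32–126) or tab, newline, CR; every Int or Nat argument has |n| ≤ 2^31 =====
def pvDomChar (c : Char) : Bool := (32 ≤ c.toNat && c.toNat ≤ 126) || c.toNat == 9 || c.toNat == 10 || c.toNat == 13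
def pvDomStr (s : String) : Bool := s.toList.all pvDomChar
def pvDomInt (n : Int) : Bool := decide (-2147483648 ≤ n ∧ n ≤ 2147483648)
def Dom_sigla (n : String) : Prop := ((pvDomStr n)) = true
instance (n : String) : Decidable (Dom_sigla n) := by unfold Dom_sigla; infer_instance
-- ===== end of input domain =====

-- B replaces A's nested index-skip run-length loop by a single forward pass carrying
-- (previous char, run count), and builds the acronym by a filterMap/join instead of a
-- string-accumulating loop; same return value on Pre_ (B is not claimed faster).
-- Strings are handled as their char lists (PySem.Chars is the documented exact form).

-- ===== PORT A =====
-- the stoplist nao_pode (tokens are char lists, see sigla below)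
def pvStop : List (List Char) :=
  ["da", "do", "de", "Para", "para", "DE", "DO", "DA"].map String.toList

-- inner while: length of the run of characters equal to caractere_atual at the front
def pvRunLen (c : Char) : List Char → Nat
  | [] => 0
  | x :: xs => if x == c then pvRunLen c xs + 1 else 0

-- outer while of compacta, on the remaining suffix of n (i = j is the drop)
def pvCompactaGo (l : List Char) : List Char :=
  match l with
  | [] => []
  | c :: rest =>
    let k := pvRunLen c rest
    -- lista += caractere_atual; if contagem > 1: lista += str(contagem)
    c :: (if 1 + k > 1 then PySem.Int.toChars ((1 + k : Nat) : Int) else [])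
      ++ pvCompactaGo (rest.drop k)
termination_by l.length
decreasing_by simp

-- lista accumulated by the for-loop of sigla (i[0] = pyGet? w 0; none = IndexError, excluded by Pre_)
def pvLetrasA (n : String) : List Char :=
  (PySem.Chars.splitOn n.toList [' ']).foldl
    (fun acc w =>
      if w ∈ pvStop then acc
      else match PySem.List.pyGet? w 0 with
        | some c => acc ++ [c]
        | none => acc) []

def sigla (n : String) : String := String.ofList (pvCompactaGo (pvLetrasA n))

-- ===== PORT B =====
def pvStopSet : PySem.Set (List Char) :=
  PySem.Set.ofList (["da", "do", "de", "Para", "para", "DE", "DO", "DA"].map String.toList)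

-- ''.join(w[0] for w in n.split(' ') if w not in nao_pode)
def pvLetrasB (n : String) : List Char :=
  (PySem.Chars.splitOn n.toList [' ']).filterMap
    (fun w => if PySem.Set.contains pvStopSet w then none else PySem.List.pyGet? w 0)

-- prev + (str(cnt) if cnt > 1 else '')
def pvEntry (c : Char) (cnt : Nat) : List Char :=
  c :: (if cnt > 1 then PySem.Int.toChars ((cnt : Nat) : Int) else [])

-- one step of the forward pass: state = (partes, prev, cnt)
def pvStep (st : List (List Char) × Option Char × Nat) (c : Char) :
    List (List Char) × Option Char × Nat :=
  match st with
  | (out, some p, cnt) =>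
    if c == p then (out, some p, cnt + 1) else (out ++ [pvEntry p cnt], some c, 1)
  | (out, none, _) => (out, some c, 1)

-- the final flush after the loop
def pvFinish (st : List (List Char) × Option Char × Nat) : List (List Char) :=
  match st with
  | (out, some p, cnt) => out ++ [pvEntry p cnt]
  | (out, none, _) => out

def sigla_alt (n : String) : String :=
  -- ''.join(partes) is plain concatenation, the separator being empty
  String.ofList (pvFinish ((pvLetrasB n).foldl pvStep ([], none, 0))).flatten

-- ===== PRECONDITION & SPEC =====
-- Pre_ excludes exactly the inputs whose split(' ') contains an empty token: there
-- the Python A (and B alike) raises IndexError on i[0].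
def Pre_sigla (n : String) : Prop := ∀ w ∈ PySem.Chars.splitOn n.toList [' '], w ≠ []
instance (n : String) : Decidable (Pre_sigla n) := by unfold Pre_sigla; infer_instance
def pvWitness_sigla : String := "Universidade Federal do Rio Grande"

def Spec_sigla (n : String) (out : String) : Prop := out = sigla_alt n
instance (n : String) (out : String) : Decidable (Spec_sigla n out) := by unfold Spec_sigla; infer_instance

-- ===== CLAIM (what is proved, stated in full; the proofs are below) =====
def Claim_equal_sigla : Prop := ∀ (n : String), Dom_sigla n → Pre_sigla n → Spec_sigla n (sigla n)

-- ===== LEMMAS AND PROOFS =====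

lemma pvStopSet_eq : pvStopSet = pvStop := by decide

lemma pvLetras_eq (n : String) : pvLetrasA n = pvLetrasB n := by
  unfold pvLetrasA pvLetrasB
  simp only [pvStopSet_eq, PySem.Set.contains]
  generalize PySem.Chars.splitOn n.toList [' '] = ts
  suffices h : ∀ (acc : List Char),
      ts.foldl (fun acc w =>
        if w ∈ pvStop then acc
        else match PySem.List.pyGet? w 0 with
          | some c => acc ++ [c]
          | none => acc) acc
      = acc ++ ts.filterMap
          (fun w => if decide (w ∈ pvStop) = true then none else PySem.List.pyGet? w 0) by
    simpa using h []
  induction ts with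
  | nil => intro acc; simp
  | cons w ts ih =>
    intro acc
    simp only [List.foldl_cons, List.filterMap_cons]
    by_cases hw : w ∈ pvStop
    · simp [hw, ih]
    · cases hg : PySem.List.pyGet? w 0 with
      | none => simp [hw, ih]
      | some c => simp [hw, ih]

lemma pvCompactaGo_nil : pvCompactaGo [] = [] := by
  rw [pvCompactaGo.eq_def]

lemma pvCompactaGo_cons (c : Char) (rest : List Char) :
    pvCompactaGo (c :: rest)
      = pvEntry c (1 + pvRunLen c rest) ++ pvCompactaGo (rest.drop (pvRunLen c rest)) := by
  rw [pvCompactaGo.eq_def, pvEntry]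

lemma pvRle_main (l : List Char) (c : Char) (m : Nat) (out : List (List Char)) :
    (pvFinish (l.foldl pvStep (out, some c, m))).flatten
      = out.flatten ++ pvEntry c (m + pvRunLen c l)
          ++ pvCompactaGo (l.drop (pvRunLen c l)) := by
  induction l generalizing c m out with
  | nil => simp [pvFinish, pvRunLen, pvCompactaGo_nil]
  | cons d t ih =>
    by_cases hd : d = c
    · subst hd
      have hs : pvStep (out, some d, m) d = (out, some d, m + 1) := by simp [pvStep]
      rw [List.foldl_cons, hs, ih]
      simp [pvRunLen]
      ring_nf
    · have hs : pvStep (out, some c, m) d = (out ++ [pvEntry c m], some d, 1) := by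
        simp [pvStep, hd]
      rw [List.foldl_cons, hs, ih]
      have hr : pvRunLen c (d :: t) = 0 := by simp [pvRunLen, hd]
      rw [hr]
      simp [pvCompactaGo_cons, Nat.add_comm]

lemma pvRle_eq (l : List Char) :
    (pvFinish (l.foldl pvStep ([], none, 0))).flatten = pvCompactaGo l := by
  cases l with
  | nil => simp [pvFinish, pvCompactaGo_nil]
  | cons c rest =>
    have hs : pvStep (([] : List (List Char)), (none : Option Char), 0) c
        = ([], some c, 1) := by simp [pvStep]
    rw [List.foldl_cons, hs, pvRle_main, pvCompactaGo_cons]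
    simp

-- ===== VERDICT (by name: the statement is the Claim_ definition above) =====
theorem sigla_spec : Claim_equal_sigla := by
  intro n _ _
  unfold Spec_sigla sigla sigla_alt
  rw [pvLetras_eq, pvRle_eq]
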